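-- pv_equiv track=rewrite | github.com/gmyhre/attractor | src/agent/tools/core.py | _find_hunk_position
-- ===== SOURCE A (Python) =====
-- def _find_hunk_position(lines: list[str], context: list[str], delete: list[str]) -> int:
--     """Find position of context/delete lines in file."""
--     search = delete or context
--     if not search:
--         return 0
--     for i in range(len(lines)):
--         match = True
--         for j, s in enumerate(search):
--             if i + j >= len(lines) or lines[i + j].rstrip("\n") != s:
--                 match = False
--                 break
--         if match:
--             return i
--     return -1
-- ===== SOURCE B (Python) =====
-- def _find_hunk_position(lines: list[str], context: list[str], delete: list[str]) -> int:
--     """Knuth-Morris-Pratt search over the newline-stripped lines."""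
--     search = delete or context
--     if not search:
--         return 0
--     stripped = [l.rstrip("\n") for l in lines]
--     m = len(search)
--     # failure function: fail[q] = length of longest proper border of search[:q+1]
--     fail = [0] * m
--     k = 0
--     for q in range(1, m):
--         while k > 0 and search[q] != search[k]:
--             k = fail[k - 1]
--         if search[q] == search[k]:
--             k += 1
--         fail[q] = k
--     # linear scan of the text
--     q = 0
--     for i, line in enumerate(stripped):
--         while q > 0 and line != search[q]:
--             q = fail[q - 1]
--         if line == search[q]:
--             q += 1
--         if q == m:
--             return i - m + 1
--     return -1
-- ===== Notes on version B (the rewrite author's own statement) =====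
-- stated objective: alternative
-- what changed: B replaces A's naive position-by-position sliding-window comparison with Knuth-Morris-Pratt: it strips the lines once, builds the failure table of the pattern, and scans the text in a single linear pass that never re-examines a text line.
import Mathlib
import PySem

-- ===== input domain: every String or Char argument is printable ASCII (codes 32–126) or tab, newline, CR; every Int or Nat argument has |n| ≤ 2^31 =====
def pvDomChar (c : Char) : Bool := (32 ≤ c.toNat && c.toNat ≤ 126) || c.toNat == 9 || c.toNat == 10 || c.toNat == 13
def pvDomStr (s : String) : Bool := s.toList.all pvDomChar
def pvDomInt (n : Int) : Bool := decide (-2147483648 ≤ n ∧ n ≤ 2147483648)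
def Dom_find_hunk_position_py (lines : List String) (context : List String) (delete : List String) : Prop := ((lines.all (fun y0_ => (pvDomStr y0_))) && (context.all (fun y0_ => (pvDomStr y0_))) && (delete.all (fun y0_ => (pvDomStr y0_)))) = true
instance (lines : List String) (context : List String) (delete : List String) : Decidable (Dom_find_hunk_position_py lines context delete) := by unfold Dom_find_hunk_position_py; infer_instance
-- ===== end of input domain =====

-- B replaces A's naive sliding-window scan by Knuth-Morris-Pratt (failure table + one
-- linear pass over the once-stripped lines); same return value, different algorithm.

-- s.rstrip("\n"): drop trailing newline characters (shared string helper for both ports)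
def pvRstripNl (s : String) : String :=
  String.mk ((s.toList.reverse.dropWhile (fun c => c = '\n')).reverse)

-- ===== PORT A =====
-- inner loop of A: `for j, s in enumerate(search): if i+j >= len(lines) or lines[i+j].rstrip("\n") != s: break`
def pvMatchA (lines : List String) (i : Nat) : List String → Nat → Bool
  | [], _ => true
  | s :: rest, j =>
    if lines.length ≤ i + j then false
    else if pvRstripNl (lines.getD (i + j) "") ≠ s then false
    else pvMatchA lines i rest (j + 1)

-- outer loop of A: `for i in range(len(lines)): … if match: return i` / `return -1`
def pvScanA (lines search : List String) (i : Nat) : Nat → Int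
  | 0 => -1
  | fuel + 1 => if pvMatchA lines i search 0 then (i : Int) else pvScanA lines search (i + 1) fuel

def find_hunk_position_py (lines : List String) (context : List String) (delete : List String) : Int :=
  let search := if delete.isEmpty then context else delete
  if search.isEmpty then 0
  else pvScanA lines search 0 lines.length

-- ===== PORT B =====
-- the KMP advance: `while q > 0 and c != p[q]: q = fail[q-1]; if c == p[q]: q += 1`
-- (fuel-based recursion; fuel = the entry value of q always suffices since fail[j] ≤ j)
def pvStep (p : List String) (fail : List Nat) (c : String) : Nat → Nat → Nat
  | 0, k => if c = p.getD k "" then k + 1 else k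
  | _ + 1, 0 => if c = p.getD 0 "" then 1 else 0
  | fuel + 1, k + 1 =>
    if c = p.getD (k + 1) "" then k + 2
    else pvStep p fail c fuel (fail.getD k 0)

-- `fail = [0]*m; k = 0; for q in range(1, m): … ; fail[q] = k`
def pvBuildFail (p : List String) : List Nat :=
  ((List.range' 1 (p.length - 1)).foldl
    (fun (st : List Nat × Nat) q =>
      let k := pvStep p st.1 (p.getD q "") st.2 st.2
      (st.1.set q k, k))
    (List.replicate p.length 0, 0)).1

-- `for i, line in enumerate(stripped): … ; if q == m: return i - m + 1` / `return -1`
def pvScanB (p : List String) (fail : List Nat) : List String → Int → Nat → Int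
  | [], _, _ => -1
  | c :: rest, i, q =>
    let q' := pvStep p fail c q q
    if q' = p.length then i - (p.length : Int) + 1 else pvScanB p fail rest (i + 1) q'

def find_hunk_position_py_alt (lines : List String) (context : List String) (delete : List String) : Int :=
  let search := if delete.isEmpty then context else delete
  if search.isEmpty then 0
  else pvScanB search (pvBuildFail search) (lines.map pvRstripNl) 0 0

-- ===== PRECONDITION & SPEC =====
def Spec_find_hunk_position_py (lines : List String) (context : List String) (delete : List String) (out : Int) : Prop := out = find_hunk_position_py_alt lines context delete
instance (lines : List String) (context : List String) (delete : List String) (out : Int) : Decidable (Spec_find_hunk_position_py lines context delete out) := by unfold Spec_find_hunk_position_py; infer_instance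

-- ===== CLAIM (what is proved, stated in full; the proofs are below) =====
def Claim_equal_find_hunk_position_py : Prop := ∀ (lines : List String) (context : List String) (delete : List String), Dom_find_hunk_position_py lines context delete → Spec_find_hunk_position_py lines context delete (find_hunk_position_py lines context delete)

-- ===== LEMMAS AND PROOFS =====

-- the naive match test at position s, over the stripped lines
def pvGnat (stripped search : List String) (s : Nat) : Bool :=
  decide ((stripped.drop s).take search.length = search)

-- fail.getD j 0 is the longest proper border length of p.take (j+1), for all j < q
def FailOK (p : List String) (fail : List Nat) (q : Nat) : Prop :=
  ∀ j, j + 1 ≤ q → fail.getD j 0 ≤ j ∧ p.take (fail.getD j 0) <:+ p.take (j + 1) ∧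
    ∀ k, k ≤ j → p.take k <:+ p.take (j + 1) → k ≤ fail.getD j 0

-- ---- generic list lemmas ----

theorem pvSuffixOfSuffix {α : Type} (a b x : List α) (ha : a <:+ x) (hb : b <:+ x)
    (hl : a.length ≤ b.length) : a <:+ b := by
  rw [← List.reverse_prefix] at ha hb ⊢
  exact List.prefix_of_prefix_length_le ha hb (by simpa using hl)

theorem pvSnocSuffixSnoc {α : Type} (s x : List α) (a c : α) :
    s ++ [a] <:+ x ++ [c] ↔ a = c ∧ s <:+ x := by
  rw [← List.reverse_prefix, ← List.reverse_prefix (l₁ := s)]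
  simp [List.reverse_append]

theorem pvTakeSnoc (p : List String) (j : Nat) (h : j < p.length) :
    p.take (j + 1) = p.take j ++ [p.getD j ""] := by
  rw [List.take_succ, List.getElem?_eq_getElem h, List.getD_eq_getElem p "" h]
  rfl

theorem pvTakeSuffixSnoc (p : List String) (x : List String) (c : String) (j : Nat)
    (h : j < p.length) :
    (p.take (j + 1) <:+ x ++ [c]) ↔ (p.getD j "" = c ∧ p.take j <:+ x) := by
  rw [pvTakeSnoc p j h, pvSnocSuffixSnoc]

-- ---- A-side characterisation (first match via find?) ----

theorem pvMatchA_eq (lines : List String) :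
    ∀ (rest : List String) (i j : Nat),
      pvMatchA lines i rest j
        = decide ((((lines.map pvRstripNl).drop (i + j)).take rest.length) = rest) := by
  intro rest
  induction rest with
  | nil => intro i j; simp [pvMatchA]
  | cons s rest ih =>
    intro i j
    by_cases h : lines.length ≤ i + j
    · rw [pvMatchA, if_pos h]
      rw [List.drop_eq_nil_of_le (show (lines.map pvRstripNl).length ≤ i + j by simpa using h)]
      simp
    · have hlt : i + j < lines.length := by omega
      have h' : i + j < (lines.map pvRstripNl).length := by simpa using hlt
      rw [pvMatchA, if_neg h, List.getD_eq_getElem lines "" hlt]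
      rw [List.drop_eq_getElem_cons h']
      simp only [List.length_cons, List.take_succ_cons, List.getElem_map]
      by_cases hs : pvRstripNl lines[i + j] = s
      · rw [if_neg (by simp [hs]), ih i (j + 1), show i + (j + 1) = i + j + 1 by omega]
        rw [decide_eq_decide]
        simp [hs]
      · rw [if_pos (by simp [hs])]
        symm
        simp [hs]

theorem pvMatchA_zero (lines search : List String) (i : Nat) :
    pvMatchA lines i search 0 = pvGnat (lines.map pvRstripNl) search i := by
  rw [pvMatchA_eq]
  simp [pvGnat]

theorem pvScanA_eq (lines search : List String) :
    ∀ (fuel i : Nat),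
      pvScanA lines search i fuel
        = (match (List.range' i fuel).find? (fun k => pvMatchA lines k search 0) with
           | some k => (k : Int)
           | none => -1) := by
  intro fuel
  induction fuel with
  | zero => intro i; simp [pvScanA]
  | succ n ih =>
    intro i
    rw [pvScanA, List.range'_succ]
    by_cases h : pvMatchA lines i search 0
    · simp [h, List.find?_cons]
    · simp only [Bool.not_eq_true] at h
      simp [h, List.find?_cons, ih (i + 1)]

-- first true position of a predicate on range n
theorem pvFindRangeFirst (n s0 : Nat) (g : Nat → Bool) (h0 : s0 < n) (hg : g s0 = true)
    (hlt : ∀ s, s < s0 → g s = false) : (List.range n).find? g = some s0 := by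
  have hsplit : List.range n = List.range s0 ++ (List.range (n - s0)).map (fun x => s0 + x) := by
    rw [← List.range_add]; congr 1; omega
  rw [hsplit, List.find?_append]
  have h1 : (List.range s0).find? g = none := by
    rw [List.find?_eq_none]
    intro x hx
    rw [List.mem_range] at hx
    simp [hlt x hx]
  rw [h1]
  have hn : n - s0 = (n - s0 - 1) + 1 := by omega
  rw [hn, List.range_succ_eq_map]
  simp [List.find?_cons, hg, Option.or]

-- ---- occurrence ↔ pattern-prefix-is-suffix ----

theorem pvGnat_true_of_suffix (t p : List String) (s : Nat) (hm : 0 < p.length)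
    (hs : s + p.length ≤ t.length) (hsuf : p <:+ t.take (s + p.length)) :
    pvGnat t p s = true := by
  have htk : t.take (s + p.length) = t.take s ++ (t.drop s).take p.length := by
    rw [← List.take_add]
  have hsuf2 : (t.drop s).take p.length <:+ t.take (s + p.length) := by
    rw [htk]; exact List.suffix_append _ _
  have hlen : ((t.drop s).take p.length).length = p.length := by
    simp; omega
  have hps := pvSuffixOfSuffix p ((t.drop s).take p.length) _ hsuf hsuf2 (by rw [hlen])
  have heq := hps.eq_of_length (by rw [hlen])
  simp only [pvGnat, decide_eq_true_eq]
  exact heq.symm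

theorem pvGnat_true_iff (t p : List String) (s : Nat) (hm : 0 < p.length) :
    pvGnat t p s = true ↔ (s + p.length ≤ t.length ∧ p <:+ t.take (s + p.length)) := by
  constructor
  · intro h
    simp only [pvGnat, decide_eq_true_eq] at h
    have hlen := congrArg List.length h
    simp at hlen
    have hle : s + p.length ≤ t.length := by omega
    refine ⟨hle, ?_⟩
    have htk : t.take (s + p.length) = t.take s ++ (t.drop s).take p.length := by
      rw [← List.take_add]
    rw [htk]
    nth_rewrite 1 [← h]
    exact List.suffix_append _ _
  · rintro ⟨h1, h2⟩
    exact pvGnat_true_of_suffix t p s hm h1 h2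

-- ---- pvStep: fuel irrelevance and specification ----

theorem pvStep_fuel (p : List String) (fail : List Nat) (c : String) :
    ∀ k f1 f2, k ≤ f1 → k ≤ f2 → (∀ j, j + 1 ≤ k → fail.getD j 0 ≤ j) →
      pvStep p fail c f1 k = pvStep p fail c f2 k := by
  intro k
  induction k using Nat.strong_induction_on with
  | _ k ih =>
    intro f1 f2 h1 h2 hfl
    match k, f1, f2 with
    | 0, 0, 0 => rfl
    | 0, 0, _ + 1 => simp [pvStep]
    | 0, _ + 1, 0 => simp [pvStep]
    | 0, _ + 1, _ + 1 => simp [pvStep]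
    | k + 1, g1 + 1, g2 + 1 =>
      simp only [pvStep]
      by_cases hc : c = p.getD (k + 1) ""
      · simp [hc]
      · rw [if_neg hc, if_neg hc]
        have hb : fail.getD k 0 ≤ k := hfl k (by omega)
        exact ih (fail.getD k 0) (by omega) g1 g2 (by omega) (by omega)
          (fun j hj => hfl j (by omega))

theorem pvStep_spec (p : List String) (fail : List Nat) (c : String) :
    ∀ q, q < p.length → FailOK p fail q → ∀ x : List String, p.take q <:+ x →
      pvStep p fail c q q ≤ q + 1 ∧
      p.take (pvStep p fail c q q) <:+ x ++ [c] ∧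
      (∀ k, k ≤ q + 1 → p.take k <:+ x ++ [c] → k ≤ pvStep p fail c q q) := by
  intro q
  induction q using Nat.strong_induction_on with
  | _ q ih =>
    intro hq hfail x hx
    match q with
    | 0 =>
      simp only [pvStep]
      by_cases hc : c = p.getD 0 ""
      · rw [if_pos hc]
        refine ⟨le_refl _, ?_, fun k hk _ => hk⟩
        rw [pvTakeSuffixSnoc p x c 0 hq]
        exact ⟨hc.symm, by simp⟩
      · rw [if_neg hc]
        refine ⟨by omega, by simp, ?_⟩
        intro k hk hks
        match k with
        | 0 => omega
        | 1 =>
          rw [pvTakeSuffixSnoc p x c 0 hq] at hks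
          exact absurd hks.1.symm hc
    | q0 + 1 =>
      have hunf : pvStep p fail c (q0 + 1) (q0 + 1)
          = if c = p.getD (q0 + 1) "" then q0 + 2
            else pvStep p fail c q0 (fail.getD q0 0) := rfl
      by_cases hc : c = p.getD (q0 + 1) ""
      · rw [hunf, if_pos hc]
        refine ⟨le_refl _, ?_, fun k hk _ => hk⟩
        rw [pvTakeSuffixSnoc p x c (q0 + 1) hq]
        exact ⟨hc.symm, hx⟩
      · rw [hunf, if_neg hc]
        obtain ⟨hb1, hb2, hb3⟩ := hfail q0 (le_refl _)
        set q' := fail.getD q0 0 with hq'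
        have hq'm : q' < p.length := by omega
        have hfail' : FailOK p fail q' := fun j hj => hfail j (by omega)
        have hx' : p.take q' <:+ x := hb2.trans hx
        have hfuel : pvStep p fail c q0 q' = pvStep p fail c q' q' :=
          pvStep_fuel p fail c q' q0 q' hb1 (le_refl _)
            (fun j hj => (hfail j (by omega)).1)
        rw [hfuel]
        obtain ⟨hr1, hr2, hr3⟩ := ih q' (by omega) hq'm hfail' x hx'
        refine ⟨by omega, hr2, ?_⟩
        intro k hk hks
        match k with
        | 0 => omega
        | j + 1 =>
          have hj : j < p.length := by omega
          rw [pvTakeSuffixSnoc p x c j hj] at hks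
          obtain ⟨hjc, hjx⟩ := hks
          have hjq : j ≠ q0 + 1 := fun h => hc (by rw [← h]; exact hjc.symm)
          have hjle : j ≤ q0 := by omega
          have hjb : p.take j <:+ p.take (q0 + 1) :=
            pvSuffixOfSuffix _ _ x hjx hx (by simp; omega)
          have := hb3 j hjle hjb
          exact hr3 (j + 1) (by omega) (by rw [pvTakeSuffixSnoc p x c j hj]; exact ⟨hjc, hjx⟩)

-- ---- failure-table construction is correct ----

theorem pvBuildFail_loop (p : List String) :
    ∀ cnt (q : Nat) (F : List Nat) (k : Nat),
      1 ≤ q → q + cnt = p.length → F.length = p.length →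
      k = F.getD (q - 1) 0 → FailOK p F q →
      FailOK p ((List.range' q cnt).foldl
        (fun (st : List Nat × Nat) j =>
          let k' := pvStep p st.1 (p.getD j "") st.2 st.2
          (st.1.set j k', k')) (F, k)).1 p.length := by
  intro cnt
  induction cnt with
  | zero =>
    intro q F k h1 h2 _ _ hok
    simpa [show q = p.length by omega] using hok
  | succ n ih =>
    intro q F k h1 h2 hFl hk hok
    have hqm : q < p.length := by omega
    rw [List.range'_succ, List.foldl_cons]
    obtain ⟨hb1, hb2, hb3⟩ := hok (q - 1) (by omega)
    have hq1 : q - 1 + 1 = q := by omega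
    rw [hq1] at hb2 hb3
    have hkq : k ≤ q - 1 := hk ▸ hb1
    have hkm : k < p.length := by omega
    have hkx : p.take k <:+ p.take q := hk ▸ hb2
    obtain ⟨hs1, hs2, hs3⟩ := pvStep_spec p F (p.getD q "") k hkm
      (fun j hj => hok j (by omega)) (p.take q) hkx
    set k' := pvStep p F (p.getD q "") k k with hk'
    have htq : p.take q ++ [p.getD q ""] = p.take (q + 1) := (pvTakeSnoc p q hqm).symm
    rw [htq] at hs2 hs3
    have hget : ∀ j, j ≠ q → (F.set q k').getD j 0 = F.getD j 0 := by
      intro j hj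
      simp [List.getD_eq_getElem?_getD, List.getElem?_set_ne (Ne.symm hj)]
    have hgq : (F.set q k').getD q 0 = k' := by
      simp [List.getD_eq_getElem?_getD, List.getElem?_set_self, hFl ▸ hqm]
    have hok' : FailOK p (F.set q k') (q + 1) := by
      intro j hj
      by_cases hjq : j = q
      · rw [hjq, hgq]
        refine ⟨by omega, hs2, ?_⟩
        intro kk hkk hkks
        match kk, hkk with
        | 0, _ => omega
        | j0 + 1, hkk =>
          have hj0 : j0 < p.length := by omega
          rw [← htq, pvTakeSuffixSnoc p (p.take q) (p.getD q "") j0 hj0] at hkks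
          have hj0b : j0 ≤ k := by
            have := hb3 j0 (by omega) hkks.2
            omega
          exact hs3 (j0 + 1) (by omega)
            (by rw [← htq, pvTakeSuffixSnoc p (p.take q) (p.getD q "") j0 hj0]; exact hkks)
      · rw [hget j hjq]
        exact hok j (by omega)
    exact ih (q + 1) (F.set q k') k' (by omega) (by omega) (by simp [hFl])
      (by rw [show q + 1 - 1 = q by omega, hgq]) hok'

theorem pvBuildFail_ok (p : List String) (hm : 0 < p.length) :
    FailOK p (pvBuildFail p) p.length := by
  unfold pvBuildFail
  apply pvBuildFail_loop p (p.length - 1) 1 (List.replicate p.length 0) 0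
    (le_refl _) (by omega) (by simp)
  · simp [List.getD_eq_getElem?_getD, List.getElem?_replicate, hm]
  · intro j hj
    have hj0 : j = 0 := by omega
    subst hj0
    simp [List.getD_eq_getElem?_getD, List.getElem?_replicate, hm]

-- ---- the KMP scan finds the first naive match ----

theorem pvScanB_eq (p : List String) (fail : List Nat) (t : List String)
    (hm : 0 < p.length) (hfail : FailOK p fail p.length) :
    ∀ (rest : List String) (i q : Nat), rest = t.drop i → q < p.length →
      p.take q <:+ t.take i →
      (∀ k, k ≤ p.length → p.take k <:+ t.take i → k ≤ q) →
      (∀ s, s + p.length ≤ i → pvGnat t p s = false) →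
      pvScanB p fail rest (i : Int) q
        = (match (List.range t.length).find? (pvGnat t p) with
           | some s => (s : Int)
           | none => -1) := by
  intro rest
  induction rest generalizing t with
  | nil =>
    intro i q hrest hq hsuf hmax hnomatch
    have hin : t.length ≤ i := by
      by_contra h
      push_neg at h
      have := List.drop_eq_nil_iff.mp hrest.symm
      omega
    have hnone : (List.range t.length).find? (pvGnat t p) = none := by
      rw [List.find?_eq_none]
      intro s hs
      rw [List.mem_range] at hs
      have hsl : s + p.length ≤ t.length ∨ ¬ (s + p.length ≤ t.length) := em _
      rcases hsl with hsl | hsl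
      · simp [hnomatch s (by omega)]
      · intro hg
        exact hsl ((pvGnat_true_iff t p s hm).mp hg).1
    rw [hnone]
    rfl
  | cons c rest ih =>
    intro i q hrest hq hsuf hmax hnomatch
    have hi : i < t.length := by
      by_contra h
      push_neg at h
      rw [List.drop_eq_nil_of_le h] at hrest
      exact absurd hrest (by simp)
    have hc : c = t.getD i "" := by
      have : (t.drop i).getD 0 "" = c := by rw [← hrest]; rfl
      rw [← this]
      simp [List.getD_eq_getElem?_getD, List.getElem?_drop]
    have htk1 : t.take (i + 1) = t.take i ++ [c] := by
      rw [List.take_succ, List.getElem?_eq_getElem hi, hc, List.getD_eq_getElem t "" hi]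
      rfl
    obtain ⟨hs1, hs2, hs3⟩ := pvStep_spec p fail c q hq
      (fun j hj => hfail j (by omega)) (t.take i) hsuf
    set q' := pvStep p fail c q q with hq'
    have hqi : q ≤ i := by
      have := hsuf.length_le
      simp at this
      omega
    have hmax' : ∀ k, k ≤ p.length → p.take k <:+ t.take (i + 1) → k ≤ q' := by
      intro k hk hks
      rw [htk1] at hks
      match k with
      | 0 => omega
      | j + 1 =>
        have hj : j < p.length := by omega
        rw [pvTakeSuffixSnoc p (t.take i) c j hj] at hks
        have hjq : j ≤ q := hmax j (by omega) hks.2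
        exact hs3 (j + 1) (by omega)
          (by rw [pvTakeSuffixSnoc p (t.take i) c j hj]; exact hks)
    rw [pvScanB]
    by_cases hfull : q' = p.length
    · rw [if_pos hfull]
      have hmi : p.length ≤ i + 1 := by omega
      have hocc : pvGnat t p (i + 1 - p.length) = true := by
        apply pvGnat_true_of_suffix t p _ hm (by omega)
        rw [show i + 1 - p.length + p.length = i + 1 by omega, htk1]
        have h2 := hs2
        rw [hfull, List.take_length] at h2
        exact h2
      have hfind : (List.range t.length).find? (pvGnat t p) = some (i + 1 - p.length) := by
        apply pvFindRangeFirst _ _ _ (by omega) hocc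
        intro s hs
        exact hnomatch s (by omega)
      rw [hfind]
      show (i : Int) - (p.length : Int) + 1 = ((i + 1 - p.length : Nat) : Int)
      omega
    · rw [if_neg hfull]
      have hq'm : q' < p.length := by omega
      have hrest' : rest = t.drop (i + 1) := by
        have : t.drop (i + 1) = (t.drop i).drop 1 := by
          rw [List.drop_drop]
        rw [this, ← hrest]
        rfl
      have hnomatch' : ∀ s, s + p.length ≤ i + 1 → pvGnat t p s = false := by
        intro s hs
        rcases Nat.lt_or_ge (s + p.length) (i + 1) with h | h
        · exact hnomatch s (by omega)
        · have hsi : s + p.length = i + 1 := by omega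
          by_contra hg
          rw [Bool.not_eq_false] at hg
          obtain ⟨_, hsuf2⟩ := (pvGnat_true_iff t p s hm).mp hg
          rw [hsi] at hsuf2
          have : p.length ≤ q' := by
            apply hmax' p.length (le_refl _)
            rw [← List.take_length (l := p)] at hsuf2
            exact hsuf2
          omega
      have := ih t (i + 1) q' hrest' hq'm (by rw [htk1]; exact hs2) hmax' hnomatch'
      rw [show ((i : Int) + 1) = ((i + 1 : Nat) : Int) by push_cast; ring]
      exact this

-- ===== VERDICT (by name: the statement is the Claim_ definition above) =====
theorem find_hunk_position_py_spec : Claim_equal_find_hunk_position_py := by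
  intro lines context delete _
  unfold Spec_find_hunk_position_py find_hunk_position_py find_hunk_position_py_alt
  set search := if delete.isEmpty then context else delete with hsearch
  by_cases h : search.isEmpty
  · simp [h]
  · simp only [h, if_false]
    have hm : 0 < search.length :=
      List.length_pos_of_ne_nil (by simpa [List.isEmpty_iff] using h)
    set t := lines.map pvRstripNl with ht
    have hB := pvScanB_eq search (pvBuildFail search) t hm (pvBuildFail_ok search hm)
      t 0 0 (by simp) hm (by simp) ?_ ?_
    · have hA : pvScanA lines search 0 lines.length
          = (match (List.range t.length).find? (pvGnat t search) with
             | some s => (s : Int)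
             | none => -1) := by
        rw [pvScanA_eq, ← List.range_eq_range']
        have : (fun k => pvMatchA lines k search 0) = pvGnat t search := by
          funext k
          rw [pvMatchA_zero]
        rw [this, show t.length = lines.length by simp [ht]]
      rw [hA, ← hB]
      norm_num
    · intro k hk hks
      rw [List.take_zero, List.suffix_nil] at hks
      rcases List.take_eq_nil_iff.mp hks with h0 | h0
      · omega
      · rw [h0] at hm
        simp at hm
    · intro s hs
      omega
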